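-- pv_equiv track=rewrite | github.com/t11z/tavern | backend/tavern/discord_bot/embeds/narrative.py | split_narrative
-- ===== SOURCE A (Python) =====
-- _LOOK_BACK_FROM = 10
--
-- def split_narrative(text: str, max_length: int = 2000) -> list[str]:
--     """Split *text* into chunks no longer than *max_length* characters.
--
--     Splitting is done at sentence boundaries (". ") wherever possible,
--     searching backwards from ``max_length - 10``.  If no sentence boundary
--     is found in that window the text is hard-split at that position.
--
--     Args:
--         text:       The full narrative string to split.
--         max_length: Maximum length of each returned chunk (default: 2000,
--                     Discord's per-message limit).
--
--     Returns:
--         A list of one or more non-empty strings.  Each string is stripped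
--         of leading and trailing whitespace and has length ≤ *max_length*.
--     """
--     text = text.strip()
--     if not text:
--         return []
--
--     if len(text) <= max_length:
--         return [text]
--
--     chunks: list[str] = []
--     remaining = text
--     search_up_to = max_length - _LOOK_BACK_FROM
--
--     while len(remaining) > max_length:
--         # Look for the last ". " before the safe split position.
--         pos = remaining.rfind(". ", 0, search_up_to)
--
--         if pos != -1:
--             # Cut after the period so the period stays with the chunk.
--             cut = pos + 1
--         else:
--             # No sentence boundary — hard split at the safe position.
--             cut = search_up_to
--
--         chunks.append(remaining[:cut].strip())
--         remaining = remaining[cut:].strip()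
--
--     if remaining:
--         chunks.append(remaining)
--
--     return chunks
-- ===== SOURCE B (Python) =====
-- _LOOK_BACK_FROM = 10
--
-- def split_narrative(text: str, max_length: int = 2000) -> list[str]:
--     """Index-based single pass: walk a start offset through the stripped text
--     instead of re-slicing and re-stripping the remaining tail each iteration."""
--     s = text.strip()
--     if not s:
--         return []
--     n = len(s)
--     if n <= max_length:
--         return [s]
--     chunks: list[str] = []
--     i = 0
--     search_up_to = max_length - _LOOK_BACK_FROM
--     while n - i > max_length:
--         pos = s.rfind(". ", i, i + search_up_to)
--         cut = pos + 1 if pos != -1 else i + search_up_to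
--         chunks.append(s[i:cut].rstrip())
--         i = cut
--         while i < n and s[i].isspace():
--             i += 1
--     if i < n:
--         chunks.append(s[i:])
--     return chunks
-- ===== Notes on version B (the rewrite author's own statement) =====
-- stated objective: alternative
-- what changed: B makes a single index-based pass over the once-stripped text (rfind with offset bounds, whitespace skipped in place, one rstrip per chunk) instead of A's loop that re-slices and re-strips the whole remaining tail on every iteration.
-- outside the precondition, e.g. on split_narrative('. ,ab,ab,. ', 6): A returns ['.', ',ab,', 'ab,.'], B raises IndexError; on split_narrative('ab. cd. efgh', 5): A returns ['ab.', 'cd.', 'efgh'], B returns ['ab.', 'cd.', 'efgh']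
import Mathlib
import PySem

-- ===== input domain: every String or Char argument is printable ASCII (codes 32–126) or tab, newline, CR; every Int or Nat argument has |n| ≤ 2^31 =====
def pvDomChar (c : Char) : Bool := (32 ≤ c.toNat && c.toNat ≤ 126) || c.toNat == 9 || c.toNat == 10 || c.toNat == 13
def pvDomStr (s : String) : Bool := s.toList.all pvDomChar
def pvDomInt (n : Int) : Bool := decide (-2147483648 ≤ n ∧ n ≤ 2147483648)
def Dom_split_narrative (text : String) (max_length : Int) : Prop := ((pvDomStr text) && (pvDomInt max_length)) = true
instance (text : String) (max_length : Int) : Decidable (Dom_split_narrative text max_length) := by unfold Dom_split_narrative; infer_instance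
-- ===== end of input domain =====

-- B replaces A's slice-and-restrip loop over the remaining tail by a single pass that moves a
-- start offset through the stripped text (rfind with offset bounds, whitespace skipped in place).

-- ===== PORT A =====
-- A's while loop; fuel bounds the iterations (each iteration under Pre_ consumes ≥ 1 character,
-- so `length + 1` fuel is never exhausted there); chunks are kept as List Char and turned into
-- String at the very end.
def pvALoop (fuel : Nat) (maxL u : Int) (remaining : List Char) (chunks : List (List Char)) :
    List (List Char) :=
  match fuel with
  | 0 => chunks
  | f + 1 =>
    if (remaining.length : Int) > maxL then
      let pos := PySem.Chars.rfindFrom remaining ['.', ' '] 0 (some u)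
      let cut := if pos ≠ -1 then pos + 1 else u
      pvALoop f maxL u (PySem.Chars.strip (PySem.Chars.slice remaining (some cut) none))
        (chunks ++ [PySem.Chars.strip (PySem.Chars.slice remaining none (some cut))])
    else -- the `if remaining:` epilogue after the while loop
      if remaining ≠ [] then chunks ++ [remaining] else chunks

def split_narrative (text : String) (max_length : Int) : List String :=
  let t := PySem.Chars.strip text.toList
  if t = [] then []
  else if (t.length : Int) ≤ max_length then [String.ofList t]
  else (pvALoop (t.length + 1) max_length (max_length - 10) t []).map String.ofList

-- ===== PORT B =====
-- `while i < n and s[i].isspace(): i += 1`; under Pre_ the index i is never negative, so the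
-- guard `0 ≤ i` only makes the recursion well-founded.
def pvSkipWs (s : List Char) (i : Int) : Int :=
  if h : 0 ≤ i ∧ i.toNat < s.length then
    if PySem.Chars.isspace (s.get ⟨i.toNat, h.2⟩) then pvSkipWs s (i + 1) else i
  else i
termination_by s.length - i.toNat
decreasing_by
  have h1 : (i + 1).toNat = i.toNat + 1 := by omega
  omega

def pvBLoop (fuel : Nat) (maxL u : Int) (s : List Char) (i : Int) (chunks : List (List Char)) :
    List (List Char) :=
  match fuel with
  | 0 => chunks
  | f + 1 =>
    if (s.length : Int) - i > maxL then
      let pos := PySem.Chars.rfindFrom s ['.', ' '] i (some (i + u))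
      let cut := if pos ≠ -1 then pos + 1 else i + u
      pvBLoop f maxL u s (pvSkipWs s cut)
        (chunks ++ [PySem.Chars.rstrip (PySem.Chars.slice s (some i) (some cut))])
    else -- the `if i < n:` epilogue after the while loop
      if i < (s.length : Int) then chunks ++ [PySem.Chars.slice s (some i) none] else chunks

def split_narrative_alt (text : String) (max_length : Int) : List String :=
  let s := PySem.Chars.strip text.toList
  if s = [] then []
  else if (s.length : Int) ≤ max_length then [String.ofList s]
  else (pvBLoop (s.length + 1) max_length (max_length - 10) s 0 []).map String.ofList

-- ===== PRECONDITION & SPEC =====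
-- Pre_ excludes the inputs where the text must actually be split but max_length ≤ 10: there the
-- look-back window max_length-10 is non-positive and A either loops forever (cut = 0) or builds
-- its chunks through Python's negative-index wraparound in rfind/slicing.
def Pre_split_narrative (text : String) (max_length : Int) : Prop :=
  11 ≤ max_length ∨ ((PySem.Chars.strip text.toList).length : Int) ≤ max_length ∨
    PySem.Chars.strip text.toList = []
instance (text : String) (max_length : Int) : Decidable (Pre_split_narrative text max_length) := by
  unfold Pre_split_narrative; infer_instance

def pvWitness_split_narrative : String × Int := ("One two three. Four five six seven.", 20)

def Spec_split_narrative (text : String) (max_length : Int) (out : List String) : Prop :=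
  out = split_narrative_alt text max_length
instance (text : String) (max_length : Int) (out : List String) :
    Decidable (Spec_split_narrative text max_length out) := by
  unfold Spec_split_narrative; infer_instance

-- ===== CLAIM (what is proved, stated in full; the proofs are below) =====
def Claim_equal_split_narrative : Prop :=
  ∀ (text : String) (max_length : Int), Dom_split_narrative text max_length →
    Pre_split_narrative text max_length →
    Spec_split_narrative text max_length (split_narrative text max_length)

-- ===== LEMMAS AND PROOFS =====


lemma pvRfindGo_spec (s sub : List Char) :
    ∀ m : Nat, PySem.Chars.rfind.go s sub m = -1 ∨
      (0 ≤ PySem.Chars.rfind.go s sub m ∧ (PySem.Chars.rfind.go s sub m).toNat ≤ m ∧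
        sub <+: s.drop (PySem.Chars.rfind.go s sub m).toNat) := by
  intro m
  induction m with
  | zero =>
    rw [PySem.Chars.rfind.go]
    split
    · right
      refine ⟨by omega, by omega, ?_⟩
      simpa using (PySem.Chars.startswith_iff s sub).mp (by assumption)
    · left; rfl
  | succ j ih =>
    rw [PySem.Chars.rfind.go]
    split
    · right
      refine ⟨by omega, by omega, ?_⟩
      have : sub <+: List.drop (j+1) s := (PySem.Chars.startswith_iff _ sub).mp (by assumption)
      simpa using this
    · rcases ih with h1 | ⟨h1, h2, h3⟩
      · left; exact h1
      · right; exact ⟨h1, by omega, h3⟩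

lemma pvRfind_spec (s sub : List Char) (h : PySem.Chars.rfind s sub ≠ -1) :
    0 ≤ PySem.Chars.rfind s sub ∧
      (PySem.Chars.rfind s sub).toNat + sub.length ≤ s.length := by
  unfold PySem.Chars.rfind at *
  rcases pvRfindGo_spec s sub s.length with h1 | ⟨h1, h2, h3⟩
  · exact absurd h1 h
  · refine ⟨h1, ?_⟩
    have := h3.length_le
    simp [List.length_drop] at this
    omega

lemma pvRfindFrom_nat (s sub : List Char) (a : Nat) (b : Int) (ha : a ≤ s.length)
    (hab : (a : Int) ≤ b) :
    PySem.Chars.rfindFrom s sub (a : Int) (some b) =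
      (if PySem.Chars.rfind (List.drop a (List.take (min s.length b.toNat) s)) sub = -1 then -1
       else (a : Int) + PySem.Chars.rfind (List.drop a (List.take (min s.length b.toNat) s)) sub) := by
  unfold PySem.Chars.rfindFrom
  dsimp only
  have hb : 0 ≤ b := by omega
  have he : (if (s.length : Int) < b then (s.length : Int)
      else if b < 0 then (if b + (s.length : Int) < 0 then 0 else b + (s.length : Int)) else b)
      = ((min s.length b.toNat : Nat) : Int) := by
    split_ifs <;> omega
  rw [he]
  have hst : (if (a : Int) < 0 then (if (a : Int) + (s.length : Int) < 0 then 0 else (a : Int) + (s.length : Int)) else (a : Int)) = (a : Int) := by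
    split_ifs <;> omega
  rw [hst]
  rw [if_neg (by omega)]
  simp only [Int.toNat_natCast]

lemma pvRfindFrom_shift (s sub : List Char) (k : Nat) (u : Int) (hu : 1 ≤ u)
    (hk : k ≤ s.length) :
    PySem.Chars.rfindFrom s sub (k : Int) (some ((k : Int) + u)) =
      (if PySem.Chars.rfindFrom (s.drop k) sub 0 (some u) = -1 then -1
       else (k : Int) + PySem.Chars.rfindFrom (s.drop k) sub 0 (some u)) := by
  obtain ⟨v, rfl⟩ : ∃ v : Nat, u = (v : Int) := ⟨u.toNat, by omega⟩
  have h1 := pvRfindFrom_nat s sub k ((k : Int) + v) hk (by omega)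
  have h2 := pvRfindFrom_nat (s.drop k) sub 0 (v : Int) (by omega) (by omega)
  have hlist : List.drop k (List.take (min s.length ((k : Int) + (v : Int)).toNat) s)
      = List.drop 0 (List.take (min (s.drop k).length ((v : Int)).toNat) (s.drop k)) := by
    rw [List.drop_take]
    simp only [List.drop_zero, List.length_drop, Int.toNat_natCast]
    congr 1
    omega
  norm_num at h2
  rw [h1, hlist]
  simp only [List.drop_zero]
  rw [h2]
  simp only [Int.toNat_natCast, List.length_drop]
  by_cases hr : PySem.Chars.rfind (List.take (min (s.length - k) v) (List.drop k s)) sub = -1 <;>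
    simp [hr]

lemma pvRfindFrom_zero_spec (r sub : List Char) (u : Int) (hu : 1 ≤ u)
    (h : PySem.Chars.rfindFrom r sub 0 (some u) ≠ -1) :
    0 ≤ PySem.Chars.rfindFrom r sub 0 (some u) ∧
      (PySem.Chars.rfindFrom r sub 0 (some u)).toNat + sub.length ≤
        min r.length u.toNat := by
  have h1 := pvRfindFrom_nat r sub 0 u (by omega) (by omega)
  simp only [Nat.cast_zero, List.drop_zero] at h1
  rw [h1] at h ⊢
  split_ifs at h ⊢ with hr
  · exact absurd rfl h
  · have := pvRfind_spec _ _ hr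
    rw [List.length_take] at this
    refine ⟨by omega, ?_⟩
    omega


lemma pvPrefix_head (l₁ l₂ : List Char) (a : Char) (h : l₁ <+: l₂) (ha : l₁.head? = some a) :
    l₂.head? = some a := by
  obtain ⟨t, rfl⟩ := h
  cases l₁ <;> simp_all

lemma pvRstrip_prefix (xs : List Char) : PySem.Chars.rstrip xs <+: xs := by
  unfold PySem.Chars.rstrip
  have h := List.dropWhile_suffix (l := xs.reverse) PySem.Chars.isspace
  have := h.reverse
  simpa using this

lemma pvStrip_eq_rstrip (xs : List Char) (a : Char) (ha : xs.head? = some a)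
    (hw : PySem.Chars.isspace a = false) : PySem.Chars.strip xs = PySem.Chars.rstrip xs := by
  unfold PySem.Chars.strip PySem.Chars.lstrip
  cases xs with
  | nil => simp at ha
  | cons b t =>
    simp at ha
    subst ha
    simp [hw]

lemma pvDropWhile_head (p : Char → Bool) (l : List Char) (a : Char)
    (h : (List.dropWhile p l).head? = some a) : p a = false := by
  have := List.head?_dropWhile_not p l
  rw [h] at this
  simpa using this

lemma pvStrip_head (t : List Char) (a : Char) (ha : (PySem.Chars.strip t).head? = some a) :
    PySem.Chars.isspace a = false := by
  have h1 : PySem.Chars.strip t <+: PySem.Chars.lstrip t := by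
    unfold PySem.Chars.strip
    exact pvRstrip_prefix _
  have h2 := pvPrefix_head _ _ a h1 ha
  unfold PySem.Chars.lstrip at h2
  exact pvDropWhile_head _ _ _ h2

lemma pvRstrip_rstrip (xs : List Char) :
    PySem.Chars.rstrip (PySem.Chars.rstrip xs) = PySem.Chars.rstrip xs := by
  unfold PySem.Chars.rstrip
  simp [List.dropWhile_idempotent]

lemma pvRstrip_strip (t : List Char) :
    PySem.Chars.rstrip (PySem.Chars.strip t) = PySem.Chars.strip t := by
  unfold PySem.Chars.strip
  exact pvRstrip_rstrip _

lemma pvRstrip_eq_self_of_suffix (s Y : List Char) (hs : PySem.Chars.rstrip s = s)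
    (h : Y <:+ s) : PySem.Chars.rstrip Y = Y := by
  unfold PySem.Chars.rstrip at *
  have hrev : Y.reverse <+: s.reverse := by
    obtain ⟨p, rfl⟩ := h
    simp
  have hsrev : List.dropWhile PySem.Chars.isspace s.reverse = s.reverse := by
    have := congrArg List.reverse hs
    simpa using this
  rw [List.dropWhile_eq_self_iff] at hsrev
  have hY : List.dropWhile PySem.Chars.isspace Y.reverse = Y.reverse := by
    rw [List.dropWhile_eq_self_iff]
    intro hl
    have hlen : 0 < s.reverse.length := by
      have := hrev.length_le
      omega
    have := hrev.getElem (i := 0) (by omega)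
    rw [this]
    exact hsrev hlen
  rw [hY]
  simp

lemma pvStrip_drop (s : List Char) (hs : PySem.Chars.rstrip s = s) (c : Nat) :
    PySem.Chars.strip (s.drop c) = List.dropWhile PySem.Chars.isspace (s.drop c) := by
  unfold PySem.Chars.strip PySem.Chars.lstrip
  apply pvRstrip_eq_self_of_suffix s _ hs
  exact (List.dropWhile_suffix _).trans (List.drop_suffix _ _)

lemma pvSkipWs_spec (s : List Char) :
    ∀ c : Nat, c ≤ s.length → ∃ m : Nat, pvSkipWs s (c : Int) = (m : Int) ∧ c ≤ m ∧
      m ≤ s.length ∧ s.drop m = List.dropWhile PySem.Chars.isspace (s.drop c) := by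
  intro c hc
  induction hfuel : s.length - c generalizing c with
  | zero =>
    have hceq : c = s.length := by omega
    refine ⟨c, ?_, le_refl c, by omega, by subst hceq; simp⟩
    rw [pvSkipWs]
    simp [hceq]
  | succ f ih =>
    have hclt : c < s.length := by omega
    have hdrop : s.drop c = s[c] :: s.drop (c + 1) := List.drop_eq_getElem_cons hclt
    rw [pvSkipWs]
    rw [dif_pos ⟨by omega, by simpa using hclt⟩]
    by_cases hws : PySem.Chars.isspace s[c]
    · rw [if_pos (by simpa using hws)]
      have hrec := ih (c + 1) (by omega) (by omega)
      obtain ⟨m, hm1, hm2, hm3, hm4⟩ := hrec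
      refine ⟨m, ?_, by omega, hm3, ?_⟩
      · rw [← hm1]; norm_num
      · rw [hm4, hdrop, List.dropWhile_cons, if_pos hws]
    · rw [if_neg (by simpa using hws)]
      refine ⟨c, rfl, le_refl c, by omega, ?_⟩
      rw [hdrop, List.dropWhile_cons, if_neg hws, ← hdrop]

-- head? of a nonempty take
lemma pvHead?_take (c : Nat) (hc : 1 ≤ c) (xs : List Char) : (List.take c xs).head? = xs.head? := by
  cases xs <;> cases c <;> simp_all

-- One loop iteration: both sides append the same chunk and reach corresponding states.
lemma pvStep (f : Nat) (maxL u : Int) (s : List Char) (hs : PySem.Chars.rstrip s = s)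
    (ih : ∀ (k : Nat) (acc : List (List Char)), k ≤ s.length →
      (∀ a, (s.drop k).head? = some a → PySem.Chars.isspace a = false) →
      pvALoop f maxL u (s.drop k) acc = pvBLoop f maxL u s (k : Int) acc)
    (k : Nat) (acc : List (List Char))
    (hhead : ∀ a, (s.drop k).head? = some a → PySem.Chars.isspace a = false)
    (cut : Int) (hc1 : 1 ≤ cut) (hc2 : k + cut.toNat ≤ s.length) :
    pvALoop f maxL u (PySem.Chars.strip (PySem.Chars.slice (s.drop k) (some cut) none))
        (acc ++ [PySem.Chars.strip (PySem.Chars.slice (s.drop k) none (some cut))]) =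
      pvBLoop f maxL u s (pvSkipWs s ((k : Int) + cut))
        (acc ++ [PySem.Chars.rstrip (PySem.Chars.slice s (some (k : Int)) (some ((k : Int) + cut)))]) := by
  obtain ⟨v, rfl⟩ : ∃ v : Nat, cut = (v : Int) := ⟨cut.toNat, by omega⟩
  have hv : 1 ≤ v := by omega
  have hkv : k + v ≤ s.length := by omega
  have hklt : k < s.length := by omega
  -- the appended chunks are equal
  have hslice1 : PySem.Chars.slice (s.drop k) none (some (v : Int)) = List.take v (s.drop k) := by
    simp [PySem.Chars.slice_eq_listSlice, PySem.List.slice_to_natCast]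
  have hslice2 : PySem.Chars.slice s (some (k : Int)) (some ((k : Int) + (v : Int))) =
      List.take v (s.drop k) := by
    simp [PySem.Chars.slice_eq_listSlice]
    rw [show (k : Int) + (v : Int) = ((k + v : Nat) : Int) by push_cast; ring]
    rw [PySem.List.slice_natCast]
    congr 1
    omega
  have hhd : ∃ a, (s.drop k).head? = some a := by
    cases hdk : s.drop k with
    | nil => exact absurd (List.drop_eq_nil_iff.mp hdk) (by omega)
    | cons a t => exact ⟨a, rfl⟩
  obtain ⟨a, ha⟩ := hhd
  have hchunk : PySem.Chars.strip (List.take v (s.drop k)) =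
      PySem.Chars.rstrip (List.take v (s.drop k)) := by
    refine pvStrip_eq_rstrip _ a ?_ (hhead a ha)
    rw [pvHead?_take v hv]
    exact ha
  -- the new states are equal
  have hslice3 : PySem.Chars.slice (s.drop k) (some (v : Int)) none = s.drop (k + v) := by
    simp [PySem.Chars.slice_eq_listSlice, PySem.List.slice_from_natCast, List.drop_drop]
  obtain ⟨m, hm1, hm2, hm3, hm4⟩ := pvSkipWs_spec s (k + v) hkv
  have hstate : PySem.Chars.strip (s.drop (k + v)) = s.drop m := by
    rw [pvStrip_drop s hs (k + v), ← hm4]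
  rw [hslice1, hslice2, hslice3, hchunk, hstate]
  rw [show (k : Int) + (v : Int) = ((k + v : Nat) : Int) by push_cast; ring, hm1]
  exact ih m _ hm3 (fun b hb => by
    rw [hm4] at hb
    exact pvDropWhile_head _ _ _ hb)

-- The two loops advance in lockstep.
lemma pvLoop_eq (maxL : Int) (s : List Char) (hm : 11 ≤ maxL)
    (hs : PySem.Chars.rstrip s = s) :
    ∀ (fuel : Nat) (k : Nat) (acc : List (List Char)), k ≤ s.length →
      (∀ a, (s.drop k).head? = some a → PySem.Chars.isspace a = false) →
      pvALoop fuel maxL (maxL - 10) (s.drop k) acc = pvBLoop fuel maxL (maxL - 10) s (k : Int) acc := by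
  intro fuel
  induction fuel with
  | zero => intro k acc _ _; rfl
  | succ f ih =>
    intro k acc hk hhead
    have hu : 1 ≤ maxL - 10 := by omega
    have hlen : ((s.drop k).length : Int) = (s.length : Int) - (k : Int) := by
      rw [List.length_drop]; omega
    rw [pvALoop, pvBLoop]
    by_cases hcond : (s.length : Int) - (k : Int) > maxL
    · rw [if_pos (by omega : ((s.drop k).length : Int) > maxL), if_pos hcond]
      have hshift := pvRfindFrom_shift s ['.', ' '] k (maxL - 10) hu hk
      set posA := PySem.Chars.rfindFrom (s.drop k) ['.', ' '] 0 (some (maxL - 10)) with hposA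
      by_cases hpos : posA = -1
      · rw [hshift, if_pos hpos, hpos]
        norm_num
        have h1 : (1 : Int) ≤ maxL - 10 := hu
        have h2 : k + (maxL - 10).toNat ≤ s.length := by omega
        exact pvStep f maxL (maxL - 10) s hs ih k acc hhead (maxL - 10) h1 h2
      · obtain ⟨hge, hwin⟩ := pvRfindFrom_zero_spec (s.drop k) ['.', ' '] (maxL - 10) hu hpos
        rw [← hposA] at hge hwin
        have hne : ((k : Int) + posA) ≠ -1 := by omega
        rw [hshift, if_neg hpos]
        norm_num [hpos, hne]
        rw [List.length_drop] at hwin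
        have h2 : k + (posA + 1).toNat ≤ s.length := by
          simp at hwin
          omega
        have hst := pvStep f maxL (maxL - 10) s hs ih k acc hhead (posA + 1) (by omega) h2
        simp only [PySem.Chars.slice_eq_listSlice] at hst
        rw [show (k : Int) + posA + 1 = (k : Int) + (posA + 1) by ring]
        exact hst
    · rw [if_neg (by omega : ¬ ((s.drop k).length : Int) > maxL), if_neg (by omega : ¬ (s.length : Int) - (k : Int) > maxL)]
      have hslice : PySem.Chars.slice s (some (k : Int)) none = s.drop k := by
        simp [PySem.Chars.slice_eq_listSlice, PySem.List.slice_from_natCast]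
      by_cases hnil : s.drop k = []
      · rw [if_neg (by simp [hnil]), if_neg (by have := List.drop_eq_nil_iff.mp hnil; omega)]
      · have hlt : k < s.length := by
          rcases Nat.lt_or_ge k s.length with h | h
          · exact h
          · exact absurd (List.drop_eq_nil_iff.mpr h) hnil
        rw [if_pos hnil, if_pos (by exact_mod_cast hlt), hslice]

-- ===== VERDICT (by name: the statement is the Claim_ definition above) =====
theorem split_narrative_spec : Claim_equal_split_narrative := by
  intro text max_length _ hpre
  unfold Spec_split_narrative
  unfold split_narrative split_narrative_alt
  by_cases h1 : PySem.Chars.strip text.toList = []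
  · simp [h1]
  · by_cases h2 : ((PySem.Chars.strip text.toList).length : Int) ≤ max_length
    · simp [h1, h2]
    · have hm : 11 ≤ max_length := by
        rcases hpre with h | h | h
        · exact h
        · exact absurd h h2
        · exact absurd h h1
      simp only [if_neg h1, if_neg h2]
      congr 1
      have := pvLoop_eq max_length (PySem.Chars.strip text.toList) hm
        (pvRstrip_strip text.toList)
        ((PySem.Chars.strip text.toList).length + 1) 0 []
        (by omega) (by simpa using fun a ha => pvStrip_head text.toList a ha)
      simpa using this
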